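-- pv_equiv track=rewrite | github.com/GundalaNikhil/DSA | dsa-problems/Bitwise/solutions/python/BIT-009-smallest-absent-xor.py | smallest_absent_xor
-- ===== SOURCE A (Python) =====
-- def smallest_absent_xor(a: list[int]) -> int:
--     basis = [0] * 32
--
--     for x in a:
--         for i in range(30, -1, -1):
--             if (x >> i) & 1:
--                 if basis[i] == 0:
--                     basis[i] = x
--                     break
--                 x ^= basis[i]
--
--     for i in range(31):
--         if basis[i] == 0:
--             return 1 << i
--
--     return 1 << 31
-- ===== SOURCE B (Python) =====
-- def smallest_absent_xor(a: list[int]) -> int: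
--     MASK = (1 << 31) - 1
--     vals = [v for v in (x & MASK for x in a) if v]
--     pivots = []
--     while vals:
--         m = max(vals)
--         p = m.bit_length() - 1
--         pivots.append(p)
--         vals = [w for w in (v ^ m if (v >> p) & 1 else v for v in vals) if w]
--     for i in range(31):
--         if i not in pivots:
--             return 1 << i
--     return 1 << 31
-- ===== Notes on version B (the rewrite author's own statement) =====
-- stated objective: alternative
-- what changed: B replaces A's streaming insertion into a bit-indexed basis array by offline batch Gaussian elimination: it repeatedly takes the maximum of the whole (31-bit-masked, zero-filtered) list, records its top bit as a pivot, XORs it into every element sharing that bit and drops the zeros, until the list is empty; the pivot-position set of the span is a canonical invariant, so the answer 1<<(smallest non-pivot bit) is unchanged.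
import Mathlib
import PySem

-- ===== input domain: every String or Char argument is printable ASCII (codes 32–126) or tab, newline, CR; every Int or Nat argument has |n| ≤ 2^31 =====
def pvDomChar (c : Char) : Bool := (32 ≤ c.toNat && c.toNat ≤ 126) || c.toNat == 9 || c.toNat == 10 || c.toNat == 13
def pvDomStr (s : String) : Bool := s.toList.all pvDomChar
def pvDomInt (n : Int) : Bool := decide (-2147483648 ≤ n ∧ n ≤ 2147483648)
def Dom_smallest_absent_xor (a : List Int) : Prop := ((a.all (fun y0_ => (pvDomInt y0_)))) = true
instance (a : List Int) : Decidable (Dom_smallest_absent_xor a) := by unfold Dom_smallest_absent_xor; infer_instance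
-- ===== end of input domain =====

-- B replaces A's streaming insertion into a bit-indexed basis array by offline batch
-- Gaussian elimination: repeatedly take the maximum of the masked list, record its top
-- bit as a pivot, XOR it into every element sharing that bit, drop zeros, repeat;
-- the pivot-bit set of the span is canonical, so the answer is the same (alternative).

-- ===== PORT A =====
-- Literal port of A. Python's `basis[i]` (i in 0..30, len(basis)=32, always in range)
-- is List.getD, `basis[i] = x` is List.set; the inner `for i in range(30,-1,-1)` with
-- `break` is the structural countdown recursion saxInner; the final `for i in range(31)`
-- is saxFind over range(31) = PySem.List.pyRange 0 31 1.
def saxInner : Nat → Int → List Int → List Int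
  | i, x, basis =>
    if PySem.Int.band (x >>> i) 1 ≠ 0 then
      if basis.getD i 0 = 0 then basis.set i x
      else
        match i with
        | 0 => basis
        | j+1 => saxInner j (PySem.Int.bxor x (basis.getD (j+1) 0)) basis
    else
      match i with
      | 0 => basis
      | j+1 => saxInner j x basis

def saxFind (basis : List Int) : List Int → Int
  | [] => (1 : Int) <<< 31
  | i :: rest => if basis.getD i.toNat 0 = 0 then (1 : Int) <<< i.toNat else saxFind basis rest

def smallest_absent_xor (a : List Int) : Int :=
  saxFind (a.foldl (fun basis x => saxInner 30 x basis) (List.replicate 32 0))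
    (PySem.List.pyRange 0 31 1)

-- ===== PORT B =====
-- Literal port of B (Source B). The while loop is altElimF with fuel = vals.length (each
-- Python iteration removes at least the maximum, which maps to 0 and is filtered out,
-- so this fuel is exact on the values the function ever passes: positive masked ints).
-- max(vals) is PySem.List.max? with identity key (vals nonempty, so `.getD 0` is never
-- the default); p = m.bit_length() - 1 is nonnegative there, so Python's `v >> p` is
-- `v >>> p.toNat` exactly; `i not in pivots` is list membership.
def altElimF : Nat → List Int → List Int
  | 0, _ => []
  | _+1, [] => []
  | fuel+1, v :: vs =>
      let m := (PySem.List.max? (v :: vs) (fun y => y)).getD 0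
      let p : Int := (PySem.Int.bitLength m : Int) - 1
      let vals' := ((v :: vs).map
        (fun w : Int => if PySem.Int.band (w >>> p.toNat) 1 ≠ 0 then PySem.Int.bxor w m else w)).filter
        (fun w => w ≠ 0)
      p :: altElimF fuel vals'

def altFindB (pivots : List Int) : List Int → Int
  | [] => (1 : Int) <<< 31
  | i :: rest => if i ∈ pivots then altFindB pivots rest else (1 : Int) <<< i.toNat

def smallest_absent_xor_alt (a : List Int) : Int :=
  let vals := (a.map (fun x => PySem.Int.band x 2147483647)).filter (fun v => v ≠ 0)
  altFindB (altElimF vals.length vals) (PySem.List.pyRange 0 31 1)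

-- ===== PRECONDITION & SPEC =====
def Spec_smallest_absent_xor (a : List Int) (out : Int) : Prop := out = smallest_absent_xor_alt a
instance (a : List Int) (out : Int) : Decidable (Spec_smallest_absent_xor a out) := by unfold Spec_smallest_absent_xor; infer_instance

-- ===== CLAIM (what is proved, stated in full; the proofs are below) =====
def Claim_equal_smallest_absent_xor : Prop := ∀ (a : List Int), Dom_smallest_absent_xor a → Spec_smallest_absent_xor a (smallest_absent_xor a)

-- ===== LEMMAS AND PROOFS =====

def mN (x : Int) : Nat := (PySem.Int.band x 2147483647).toNat

theorem band_mask_emod (x : Int) : PySem.Int.band x 2147483647 = x % 2147483648 := by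
  have h31 : (2147483647 : Nat) = 2 ^ 31 - 1 := by norm_num
  rcases x with n | k
  · show PySem.Int.band (Int.ofNat n) 2147483647 = _
    rw [Int.ofNat_eq_natCast,
        show ((2147483647 : Int)) = ((2147483647 : Nat) : Int) by norm_num,
        PySem.Int.band_natCast]
    rw [h31, Nat.and_two_pow_sub_one_eq_mod]
    omega
  · unfold PySem.Int.band
    have h1 : ¬ (0 ≤ Int.negSucc k) := by omega
    have h2 : (0 : Int) ≤ 2147483647 := by norm_num
    rw [if_neg h1, if_pos h2]
    have h3 : (-(Int.negSucc k) - 1).toNat = k := by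
      simp [Int.negSucc_eq]
    rw [h3]
    have h4 : (2147483647 : Int).toNat = 2147483647 := rfl
    rw [h4]
    rw [Nat.and_comm, h31, Nat.and_two_pow_sub_one_eq_mod]
    have hk : k % 2 ^ 31 < 2 ^ 31 := Nat.mod_lt _ (by norm_num)
    have hkk : (k : Int) % 2147483648 = ((k % 2 ^ 31 : Nat) : Int) := by
      push_cast; norm_num
    rw [Int.negSucc_eq]
    omega

theorem mN_lt (x : Int) : mN x < 2 ^ 31 := by
  unfold mN
  rw [band_mask_emod]
  have := Int.emod_nonneg x (show (2147483648:Int) ≠ 0 by norm_num)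
  have := Int.emod_lt_of_pos x (show (0:Int) < 2147483648 by norm_num)
  omega

theorem mN_high {x : Int} {i : Nat} (h : 31 ≤ i) : (mN x).testBit i = false :=
  Nat.testBit_lt_two_pow (lt_of_lt_of_le (mN_lt x) (Nat.pow_le_pow_right (by norm_num) h))

theorem mN_ofNat (n : Nat) : mN (Int.ofNat n) = n % 2 ^ 31 := by
  unfold mN
  rw [band_mask_emod, Int.ofNat_eq_natCast]
  omega

theorem mN_negSucc (k : Nat) : mN (Int.negSucc k) = 2 ^ 31 - (k % 2 ^ 31 + 1) := by
  unfold mN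
  rw [band_mask_emod, Int.negSucc_eq]
  have hk : k % 2 ^ 31 < 2 ^ 31 := Nat.mod_lt _ (by norm_num)
  have hkk : (k : Int) % 2147483648 = ((k % 2 ^ 31 : Nat) : Int) := by push_cast; norm_num
  omega

theorem mN_testBit_negSucc (k : Nat) {i : Nat} (hi : i < 31) :
    (mN (Int.negSucc k)).testBit i = ! k.testBit i := by
  rw [mN_negSucc]
  have hk : k % 2 ^ 31 < 2 ^ 31 := Nat.mod_lt _ (by norm_num)
  rw [show 2 ^ 31 - (k % 2 ^ 31 + 1) = 2 ^ 31 - ((k % 2 ^ 31) + 1) by rfl]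
  rw [Nat.testBit_two_pow_sub_succ hk, Nat.testBit_mod_two_pow]
  simp [hi]

theorem mN_testBit_ofNat (n : Nat) {i : Nat} (hi : i < 31) :
    (mN (Int.ofNat n)).testBit i = n.testBit i := by
  rw [mN_ofNat, Nat.testBit_mod_two_pow]
  simp [hi]

theorem mN_bxor (x y : Int) : mN (PySem.Int.bxor x y) = mN x ^^^ mN y := by
  apply Nat.eq_of_testBit_eq
  intro i
  rcases lt_or_ge i 31 with hi | hi
  · rcases x with n | k <;> rcases y with m | l
    · have : PySem.Int.bxor (Int.ofNat n) (Int.ofNat m) = Int.ofNat (n ^^^ m) := by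
        unfold PySem.Int.bxor; simp
      rw [this, Nat.testBit_xor, mN_testBit_ofNat _ hi, mN_testBit_ofNat _ hi,
          mN_testBit_ofNat _ hi, Nat.testBit_xor]
    · have : PySem.Int.bxor (Int.ofNat n) (Int.negSucc l) = Int.negSucc (n ^^^ l) := by
        unfold PySem.Int.bxor
        have h1 : (0:Int) ≤ Int.ofNat n := by rw [Int.ofNat_eq_natCast]; omega
        have h2 : ¬ (0:Int) ≤ Int.negSucc l := by rw [Int.negSucc_eq]; omega
        rw [if_pos h1, if_neg h2]
        have e1 : (-(Int.negSucc l) - 1).toNat = l := by simp [Int.negSucc_eq]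
        have e2 : (Int.ofNat n).toNat = n := rfl
        rw [e1, e2, Int.negSucc_eq]
        omega
      rw [this, Nat.testBit_xor, mN_testBit_ofNat _ hi, mN_testBit_negSucc _ hi,
          mN_testBit_negSucc _ hi, Nat.testBit_xor]
      cases n.testBit i <;> cases l.testBit i <;> rfl
    · have : PySem.Int.bxor (Int.negSucc k) (Int.ofNat m) = Int.negSucc (k ^^^ m) := by
        unfold PySem.Int.bxor
        have h1 : ¬ (0:Int) ≤ Int.negSucc k := by rw [Int.negSucc_eq]; omega
        have h2 : (0:Int) ≤ Int.ofNat m := by rw [Int.ofNat_eq_natCast]; omega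
        rw [if_neg h1, if_pos h2]
        have e1 : (-(Int.negSucc k) - 1).toNat = k := by simp [Int.negSucc_eq]
        have e2 : (Int.ofNat m).toNat = m := rfl
        rw [e1, e2, Int.negSucc_eq]
        omega
      rw [this, Nat.testBit_xor, mN_testBit_negSucc _ hi, mN_testBit_negSucc _ hi,
          mN_testBit_ofNat _ hi, Nat.testBit_xor]
      cases k.testBit i <;> cases m.testBit i <;> rfl
    · have : PySem.Int.bxor (Int.negSucc k) (Int.negSucc l) = Int.ofNat (k ^^^ l) := by
        unfold PySem.Int.bxor
        have h1 : ¬ (0:Int) ≤ Int.negSucc k := by rw [Int.negSucc_eq]; omega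
        have h2 : ¬ (0:Int) ≤ Int.negSucc l := by rw [Int.negSucc_eq]; omega
        rw [if_neg h1, if_neg h2]
        have e1 : (-(Int.negSucc k) - 1).toNat = k := by simp [Int.negSucc_eq]
        have e2 : (-(Int.negSucc l) - 1).toNat = l := by simp [Int.negSucc_eq]
        rw [e1, e2]; rfl
      rw [this, Nat.testBit_xor, mN_testBit_ofNat _ hi, mN_testBit_negSucc _ hi,
          mN_testBit_negSucc _ hi, Nat.testBit_xor]
      cases k.testBit i <;> cases l.testBit i <;> rfl
  · rw [Nat.testBit_xor, mN_high hi, mN_high hi, mN_high hi]; rfl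

theorem bit_cond (x : Int) {i : Nat} (hi : i ≤ 30) :
    (PySem.Int.band (x >>> i) 1 ≠ 0) ↔ (mN x).testBit i = true := by
  rw [PySem.Int.band_one]
  have hmod : PySem.Int.mod (x >>> i) 2 = (x >>> i) % 2 := by
    unfold PySem.Int.mod
    rw [Int.fmod_eq_emod]
    simp
  rw [hmod]
  have hi' : i < 31 := by omega
  rcases x with n | k
  · have hs : (Int.ofNat n) >>> i = Int.ofNat (n >>> i) := rfl
    rw [hs, mN_testBit_ofNat _ hi', Int.ofNat_eq_natCast,
        Nat.testBit_eq_decide_div_mod_eq, Nat.shiftRight_eq_div_pow]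
    simp only [decide_eq_true_eq]
    omega
  · rw [Int.negSucc_shiftRight, mN_testBit_negSucc _ hi',
        Nat.testBit_eq_decide_div_mod_eq, Nat.shiftRight_eq_div_pow, Int.negSucc_eq]
    simp only [Bool.not_eq_true', decide_eq_false_iff_not]
    omega

theorem mN_self {v : Int} (h0 : 0 ≤ v) (hlt : v < 2147483648) : mN v = v.toNat := by
  unfold mN
  rw [band_mask_emod]
  omega

theorem mN_zero : mN 0 = 0 := by
  unfold mN
  rw [band_mask_emod]
  rfl

-- ===== log2 / testBit toolkit =====
theorem hb_testBit {n : Nat} (h : n ≠ 0) : n.testBit n.log2 = true := by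
  have h1 : 2 ^ n.log2 ≤ n := (Nat.le_log2 h).1 le_rfl
  have h2 : n < 2 ^ (n.log2 + 1) := (Nat.log2_lt h).1 (Nat.lt_succ_self _)
  rw [Nat.testBit_eq_decide_div_mod_eq]
  have hp : 0 < 2 ^ n.log2 := Nat.two_pow_pos _
  have hd1 : 1 ≤ n / 2 ^ n.log2 := (Nat.le_div_iff_mul_le hp).2 (by omega)
  have hd2 : n / 2 ^ n.log2 < 2 := (Nat.div_lt_iff_lt_mul hp).2 (by rw [Nat.pow_succ] at h2; omega)
  have : n / 2 ^ n.log2 = 1 := by omega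
  simp [this]

theorem hb_high {n j : Nat} (h : n.log2 < j) : n.testBit j = false := by
  by_cases hn : n = 0
  · subst hn; simp
  · exact Nat.testBit_lt_two_pow (lt_of_lt_of_le ((Nat.log2_lt hn).1 h)
      (Nat.pow_le_pow_right (by norm_num) le_rfl))

theorem testBit_le_hb {n j : Nat} (h : n.testBit j = true) : j ≤ n.log2 := by
  by_contra hc
  rw [hb_high (by omega)] at h
  exact Bool.false_ne_true h

theorem ne_zero_of_testBit {n j : Nat} (h : n.testBit j = true) : n ≠ 0 := by
  intro he; subst he; simp at h

theorem hb_eq {n p : Nat} (hp : n.testBit p = true) (hh : ∀ j, p < j → n.testBit j = false) :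
    n.log2 = p := by
  have hn : n ≠ 0 := ne_zero_of_testBit hp
  have h1 : p ≤ n.log2 := testBit_le_hb hp
  have h2 : n.log2 ≤ p := by
    by_contra hc
    have := hh n.log2 (by omega)
    rw [hb_testBit hn] at this
    simp at this
  omega

theorem lt_two_pow_of_bits {n k : Nat} (h : ∀ j, k ≤ j → n.testBit j = false) : n < 2 ^ k := by
  by_cases hn : n = 0
  · subst hn; exact Nat.two_pow_pos _
  · rw [← Nat.log2_lt hn]
    by_contra hc
    have := h n.log2 (by omega)
    rw [hb_testBit hn] at this
    simp at this

theorem two_pow_hb_le {n : Nat} (h : n ≠ 0) : 2 ^ n.log2 ≤ n := (Nat.le_log2 h).1 le_rfl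

theorem lt_two_pow_hb_succ {n : Nat} (h : n ≠ 0) : n < 2 ^ (n.log2 + 1) :=
  (Nat.log2_lt h).1 (Nat.lt_succ_self _)

theorem hb_xor_lt {v w : Nat} (hv : v ≠ 0) (hw : w < 2 ^ v.log2) :
    (v ^^^ w).log2 = v.log2 ∧ v ^^^ w ≠ 0 := by
  have ht : (v ^^^ w).testBit v.log2 = true := by
    rw [Nat.testBit_xor, hb_testBit hv, Nat.testBit_lt_two_pow hw]; rfl
  refine ⟨hb_eq ht ?_, ne_zero_of_testBit ht⟩
  intro j hj
  rw [Nat.testBit_xor, hb_high hj, Nat.testBit_lt_two_pow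
      (lt_of_lt_of_le hw (Nat.pow_le_pow_right (by norm_num) (by omega)))]
  rfl

theorem xor_same_hb_lt {v b : Nat} (hv : v ≠ 0) (hb0 : b ≠ 0) (he : b.log2 = v.log2) :
    v ^^^ b < 2 ^ v.log2 := by
  apply lt_two_pow_of_bits
  intro j hj
  rcases Nat.eq_or_lt_of_le hj with hj' | hj'
  · subst hj'
    have hbv : b.testBit v.log2 = true := by rw [← he]; exact hb_testBit hb0
    rw [Nat.testBit_xor, hb_testBit hv, hbv]; rfl
  · rw [Nat.testBit_xor, hb_high hj', hb_high (by omega)]; rfl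

theorem xor_aux1 (a b c : Nat) : (a ^^^ b) ^^^ (c ^^^ b) = a ^^^ c := by
  apply Nat.eq_of_testBit_eq
  intro i
  simp only [Nat.testBit_xor]
  cases a.testBit i <;> cases b.testBit i <;> cases c.testBit i <;> rfl

theorem xor_aux2 (a b c : Nat) : (a ^^^ b) ^^^ c = (a ^^^ c) ^^^ b := by
  apply Nat.eq_of_testBit_eq
  intro i
  simp only [Nat.testBit_xor]
  cases a.testBit i <;> cases b.testBit i <;> cases c.testBit i <;> rfl

-- ===== span theory over GF(2) as Nat xor =====
inductive SpanP (P : Nat → Prop) : Nat → Prop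
  | zero : SpanP P 0
  | step : ∀ {v b : Nat}, SpanP P v → P b → SpanP P (v ^^^ b)

theorem span_congr {P P' : Nat → Prop} (h : ∀ b, P b ↔ P' b) {v : Nat} :
    SpanP P v → SpanP P' v := by
  intro hs
  induction hs with
  | zero => exact .zero
  | step _ hb ih => exact .step ih ((h _).1 hb)

theorem span_mono {P P' : Nat → Prop} (h : ∀ b, P b → P' b) {v : Nat} :
    SpanP P v → SpanP P' v := by
  intro hs
  induction hs with
  | zero => exact .zero
  | step _ hb ih => exact .step ih (h _ hb)

theorem span_single {P : Nat → Prop} {b : Nat} (h : P b) : SpanP P b := by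
  have := SpanP.step (.zero) h
  simpa using this

theorem span_xor {P : Nat → Prop} {a b : Nat} (ha : SpanP P a) (hb : SpanP P b) :
    SpanP P (a ^^^ b) := by
  induction hb with
  | zero => simpa using ha
  | step hv hc ih =>
      rw [← Nat.xor_assoc]
      exact .step ih hc

theorem span_bind {P Q : Nat → Prop} (h : ∀ b, P b → SpanP Q b) {v : Nat} :
    SpanP P v → SpanP Q v := by
  intro hs
  induction hs with
  | zero => exact .zero
  | step _ hb ih => exact span_xor ih (h _ hb)

theorem span_empty {P : Nat → Prop} (h : ∀ b, ¬ P b) {v : Nat} (hs : SpanP P v) : v = 0 := by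
  induction hs with
  | zero => rfl
  | step _ hb _ => exact absurd hb (h _)

theorem span_bits {P : Nat → Prop} {j : Nat} (h : ∀ b, P b → b.testBit j = false) {v : Nat}
    (hs : SpanP P v) : v.testBit j = false := by
  induction hs with
  | zero => simp
  | step _ hb ih => rw [Nat.testBit_xor, ih, h _ hb]; rfl

theorem span_decompose {P : Nat → Prop} {c : Nat} {v : Nat}
    (hs : SpanP (fun b => P b ∨ b = c) v) :
    ∃ w, SpanP P w ∧ (v = w ∨ v = w ^^^ c) := by
  induction hs with
  | zero => exact ⟨0, .zero, Or.inl rfl⟩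
  | @step v' b _ hb ih =>
      obtain ⟨w, hw, hcase⟩ := ih
      rcases hb with hb | hb
      · rcases hcase with h' | h'
        · exact ⟨w ^^^ b, .step hw hb, Or.inl (by rw [h'])⟩
        · exact ⟨w ^^^ b, .step hw hb, Or.inr (by rw [h', xor_aux2])⟩
      · subst hb
        rcases hcase with h' | h'
        · exact ⟨w, hw, Or.inr (by rw [h'])⟩
        · exact ⟨w, hw, Or.inl (by rw [h', Nat.xor_assoc, Nat.xor_self, Nat.xor_zero])⟩

theorem span_gen_congr {P Q : Nat → Prop} (h : ∀ b, b ≠ 0 → (P b ↔ Q b)) {v : Nat} :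
    SpanP P v → SpanP Q v := by
  intro hs
  induction hs with
  | zero => exact .zero
  | @step v' b _ hb ih =>
      by_cases hb0 : b = 0
      · subst hb0; simpa using ih
      · exact .step ih ((h b hb0).1 hb)

theorem span_absorb {P : Nat → Prop} {c : Nat} (hc : SpanP P c) {v : Nat} :
    SpanP (fun b => P b ∨ b = c) v ↔ SpanP P v := by
  constructor
  · intro hs
    induction hs with
    | zero => exact .zero
    | step _ hb ih =>
        rcases hb with hb | hb
        · exact .step ih hb
        · subst hb; exact span_xor ih hc
  · exact span_mono (fun b hb => Or.inl hb)

theorem span_insert_mono {P : Nat → Prop} {u u' : Nat} (h : SpanP P (u ^^^ u')) :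
    ∀ {v : Nat}, SpanP (fun b => P b ∨ b = u) v → SpanP (fun b => P b ∨ b = u') v := by
  intro v hs
  induction hs with
  | @step w c _ hb ih =>
      rcases hb with hb | hb
      · exact .step ih (Or.inl hb)
      · subst hb
        have h1 : SpanP (fun b => P b ∨ b = u') (w ^^^ u') := .step ih (Or.inr rfl)
        have h2 : SpanP (fun b => P b ∨ b = u') (c ^^^ u') := span_mono (fun b hb => Or.inl hb) h
        have h3 := span_xor h1 h2
        rwa [xor_aux1] at h3
  | zero => exact .zero

theorem span_union_congrQ {P P' Q : Nat → Prop} (h : ∀ v, SpanP P v ↔ SpanP P' v) :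
    ∀ {v : Nat}, SpanP (fun b => P b ∨ Q b) v → SpanP (fun b => P' b ∨ Q b) v := by
  intro v hs
  induction hs with
  | step _ hb ih =>
      rcases hb with hb | hb
      · have h1 : SpanP P' _ := (h _).1 (span_single hb)
        have h2 := span_mono (fun b hb => (Or.inl hb : P' b ∨ Q b)) h1
        exact span_xor ih h2
      · exact .step ih (Or.inr hb)
  | zero => exact .zero

-- reduction: every nonzero span element has the log2 of some generator (when generators
-- have pairwise-distinct log2s)
def GoodP (P : Nat → Prop) : Prop :=
  (∀ b, P b → b ≠ 0) ∧ (∀ b b', P b → P b' → b.log2 = b'.log2 → b = b')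

inductive RedP (P : Nat → Prop) : Nat → Prop
  | zero : RedP P 0
  | step : ∀ {v b : Nat}, P b → b.log2 = v.log2 → RedP P (v ^^^ b) → RedP P v

theorem red_self {P : Nat → Prop} {b : Nat} (h : P b) : RedP P b :=
  RedP.step h rfl (by rw [Nat.xor_self]; exact .zero)

theorem red_xor_aux {P : Nat → Prop} (G : GoodP P) :
    ∀ n v w, v + w ≤ n → RedP P v → RedP P w → RedP P (v ^^^ w) := by
  intro n
  induction n with
  | zero =>
      intro v w hle hv hw
      have : v = 0 ∧ w = 0 := by omega
      rw [this.1, this.2]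
      exact .zero
  | succ n ih =>
      intro v w hle hv hw
      by_cases hv0 : v = 0
      · subst hv0; simpa using hw
      by_cases hw0 : w = 0
      · subst hw0; simpa using hv
      rcases hv with _ | ⟨hbP, hbl, hvred⟩
      · exact absurd rfl hv0
      rename_i b
      rcases hw with _ | ⟨hbP', hbl', hwred⟩
      · exact absurd rfl hw0
      rename_i b'
      have hbne : b ≠ 0 := G.1 _ hbP
      have hbne' : b' ≠ 0 := G.1 _ hbP'
      have hvb_lt : v ^^^ b < v := by
        have h1 : v ^^^ b < 2 ^ v.log2 := xor_same_hb_lt hv0 hbne hbl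
        have h2 : 2 ^ v.log2 ≤ v := two_pow_hb_le hv0
        omega
      have hwb_lt : w ^^^ b' < w := by
        have h1 : w ^^^ b' < 2 ^ w.log2 := xor_same_hb_lt hw0 hbne' hbl'
        have h2 : 2 ^ w.log2 ≤ w := two_pow_hb_le hw0
        omega
      rcases Nat.lt_trichotomy v.log2 w.log2 with hlt | heq | hgt
      · have hvlt : v < 2 ^ w.log2 :=
          lt_of_lt_of_le (lt_two_pow_hb_succ hv0) (Nat.pow_le_pow_right (by norm_num) (by omega))
        have hx := hb_xor_lt hw0 hvlt
        have hxl : (v ^^^ w).log2 = w.log2 := by rw [Nat.xor_comm]; exact hx.1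
        refine RedP.step hbP' (by rw [hxl, hbl']) ?_
        have : RedP P ((w ^^^ b') ^^^ v) := ih (w ^^^ b') v (by omega) hwred (.step hbP hbl hvred)
        have heqx : (v ^^^ w) ^^^ b' = (w ^^^ b') ^^^ v := by
          rw [Nat.xor_comm v w, xor_aux2]
        rwa [heqx]
      · have hbb : b = b' := G.2 _ _ hbP hbP' (by rw [hbl, hbl', heq])
        subst hbb
        have : RedP P ((v ^^^ b) ^^^ (w ^^^ b)) := ih (v ^^^ b) (w ^^^ b) (by omega) hvred hwred
        rwa [xor_aux1] at this
      · have hwlt : w < 2 ^ v.log2 :=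
          lt_of_lt_of_le (lt_two_pow_hb_succ hw0) (Nat.pow_le_pow_right (by norm_num) (by omega))
        have hx := hb_xor_lt hv0 hwlt
        refine RedP.step hbP (by rw [hx.1, hbl]) ?_
        have : RedP P ((v ^^^ b) ^^^ w) := ih (v ^^^ b) w (by omega) hvred (.step hbP' hbl' hwred)
        rwa [xor_aux2] at this

theorem red_xor {P : Nat → Prop} (G : GoodP P) {v w : Nat}
    (hv : RedP P v) (hw : RedP P w) : RedP P (v ^^^ w) :=
  red_xor_aux G (v + w) v w le_rfl hv hw

theorem span_red {P : Nat → Prop} (G : GoodP P) {v : Nat} (h : SpanP P v) : RedP P v := by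
  induction h with
  | zero => exact .zero
  | step _ hb ih => exact red_xor G ih (red_self hb)

theorem span_hb {P : Nat → Prop} (G : GoodP P) {v : Nat} (h : SpanP P v) (hv : v ≠ 0) :
    ∃ b, P b ∧ b.log2 = v.log2 := by
  have := span_red G h
  rcases this with _ | ⟨hbP, hbl, _⟩
  · exact absurd rfl hv
  · exact ⟨_, hbP, hbl⟩

-- ===== A-side characterisation =====
def PA (arr : List Int) (v : Nat) : Prop :=
  ∃ i : Nat, i < 31 ∧ arr.getD i 0 ≠ 0 ∧ v = mN (arr.getD i 0)

def ArrGood (arr : List Int) : Prop :=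
  ∀ i : Nat, i < 31 → arr.getD i 0 ≠ 0 →
    ((mN (arr.getD i 0)).testBit i = true ∧ ∀ j, i < j → (mN (arr.getD i 0)).testBit j = false)

theorem innA_spec : ∀ (i : Nat), i ≤ 30 → ∀ (x : Int) (arr : List Int) (v0 : Nat),
    ArrGood arr →
    (∀ j, i < j → (mN x).testBit j = false) →
    SpanP (PA arr) (mN x ^^^ v0) →
    (∃ p x', p ≤ i ∧ arr.getD p 0 = 0 ∧ saxInner i x arr = arr.set p x' ∧
      (mN x').testBit p = true ∧ (∀ j, p < j → (mN x').testBit j = false) ∧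
      SpanP (PA arr) (mN x' ^^^ v0)) ∨
    (saxInner i x arr = arr ∧ SpanP (PA arr) v0) := by
  intro i
  induction i with
  | zero =>
      intro _ x arr v0 hg hbits hspan
      by_cases hc : PySem.Int.band (x >>> (0:Nat)) 1 ≠ 0
      · have hbit0 : (mN x).testBit 0 = true := (bit_cond x (by omega)).1 hc
        by_cases he : arr.getD 0 0 = 0
        · left
          exact ⟨0, x, le_rfl, he, by rw [saxInner, if_pos hc, if_pos he], hbit0,
            fun j hj => hbits j hj, hspan⟩
        · right
          constructor
          · rw [saxInner, if_pos hc, if_neg he]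
          · have hgd := hg 0 (by omega) he
            have hx2 : mN (PySem.Int.bxor x (arr.getD 0 0)) = 0 := by
              rw [mN_bxor]
              apply Nat.eq_of_testBit_eq
              intro j
              rw [Nat.zero_testBit]
              rcases Nat.eq_zero_or_pos j with rfl | hj
              · rw [Nat.testBit_xor, hbit0, hgd.1]; rfl
              · rw [Nat.testBit_xor, hbits j (by omega), hgd.2 j (by omega)]; rfl
            have hsp2 : SpanP (PA arr) (mN (PySem.Int.bxor x (arr.getD 0 0)) ^^^ v0) := by
              rw [mN_bxor, xor_aux2]
              exact .step hspan ⟨0, by omega, he, rfl⟩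
            rw [hx2] at hsp2
            simpa using hsp2
      · right
        constructor
        · rw [saxInner, if_neg hc]
        · have hx0 : mN x = 0 := by
            apply Nat.eq_of_testBit_eq
            intro j
            rw [Nat.zero_testBit]
            rcases Nat.eq_zero_or_pos j with rfl | hj
            · rw [Bool.eq_false_iff]
              intro hb
              exact hc ((bit_cond x (by omega)).2 hb)
            · exact hbits j (by omega)
          rw [hx0] at hspan
          simpa using hspan
  | succ j ih =>
      intro hle x arr v0 hg hbits hspan
      by_cases hc : PySem.Int.band (x >>> (j+1)) 1 ≠ 0
      · have hbitj : (mN x).testBit (j+1) = true := (bit_cond x (by omega)).1 hc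
        by_cases he : arr.getD (j+1) 0 = 0
        · left
          exact ⟨j+1, x, le_rfl, he, by rw [saxInner, if_pos hc, if_pos he], hbitj,
            fun k hk => hbits k hk, hspan⟩
        · have hgd := hg (j+1) (by omega) he
          have heq : saxInner (j+1) x arr = saxInner j (PySem.Int.bxor x (arr.getD (j+1) 0)) arr := by
            rw [saxInner, if_pos hc, if_neg he]
          set x2 := PySem.Int.bxor x (arr.getD (j+1) 0) with hx2def
          have hb2 : ∀ k, j < k → (mN x2).testBit k = false := by
            intro k hk
            rw [hx2def, mN_bxor, Nat.testBit_xor]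
            rcases Nat.lt_or_ge k (j+2) with hk2 | hk2
            · have : k = j + 1 := by omega
              subst this
              rw [hbitj, hgd.1]; rfl
            · rw [hbits k (by omega), hgd.2 k (by omega)]; rfl
          have hsp2 : SpanP (PA arr) (mN x2 ^^^ v0) := by
            rw [hx2def, mN_bxor, xor_aux2]
            exact .step hspan ⟨j+1, by omega, he, rfl⟩
          have := ih (by omega) x2 arr v0 hg hb2 hsp2
          rw [heq]
          rcases this with ⟨p, x', hp, hpe, hres, hbit, hbs, hsp⟩ | ⟨hres, hsp⟩
          · exact Or.inl ⟨p, x', by omega, hpe, hres, hbit, hbs, hsp⟩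
          · exact Or.inr ⟨hres, hsp⟩
      · have heq : saxInner (j+1) x arr = saxInner j x arr := by
          simp [saxInner, hc]
        have hb2 : ∀ k, j < k → (mN x).testBit k = false := by
          intro k hk
          rcases Nat.lt_or_ge k (j+2) with hk2 | hk2
          · have : k = j + 1 := by omega
            subst this
            rw [Bool.eq_false_iff]
            intro hb
            exact hc ((bit_cond x (by omega)).2 hb)
          · exact hbits k (by omega)
        have := ih (by omega) x arr v0 hg hb2 hspan
        rw [heq]
        rcases this with ⟨p, x', hp, hpe, hres, hbit, hbs, hsp⟩ | ⟨hres, hsp⟩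
        · exact Or.inl ⟨p, x', by omega, hpe, hres, hbit, hbs, hsp⟩
        · exact Or.inr ⟨hres, hsp⟩

theorem getD_set_self {arr : List Int} {p : Nat} (h : p < arr.length) (x : Int) :
    (arr.set p x).getD p 0 = x := by
  simp [List.getD, h]

theorem getD_set_ne {arr : List Int} {p i : Nat} (hne : i ≠ p) (x : Int) :
    (arr.set p x).getD i 0 = arr.getD i 0 := by
  simp [List.getD, (Ne.symm hne : p ≠ i)]

theorem PA_hb {arr : List Int} (hg : ArrGood arr) {v : Nat} (h : PA arr v) :
    v.log2 < 31 ∧ arr.getD v.log2 0 ≠ 0 := by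
  obtain ⟨i, hi, he, rfl⟩ := h
  have hgd := hg i hi he
  rw [hb_eq hgd.1 hgd.2]
  exact ⟨hi, he⟩

theorem goodPA {arr : List Int} (hg : ArrGood arr) : GoodP (PA arr) := by
  constructor
  · rintro b ⟨i, hi, he, rfl⟩
    exact ne_zero_of_testBit (hg i hi he).1
  · rintro b b' ⟨i, hi, he, rfl⟩ ⟨i', hi', he', rfl⟩ hl
    have h1 := hg i hi he
    have h2 := hg i' hi' he'
    rw [hb_eq h1.1 h1.2, hb_eq h2.1 h2.2] at hl
    subst hl
    rfl

theorem PA_set {arr : List Int} {p : Nat} {x' : Int}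
    (hlen : p < arr.length) (hp31 : p < 31) (hpe : arr.getD p 0 = 0) (hx' : mN x' ≠ 0) :
    ∀ v, PA (arr.set p x') v ↔ (PA arr v ∨ v = mN x') := by
  have hxne : x' ≠ 0 := by
    intro h0; rw [h0, mN_zero] at hx'; exact hx' rfl
  intro v
  constructor
  · rintro ⟨i, hi, he, rfl⟩
    by_cases hip : i = p
    · subst hip
      rw [getD_set_self hlen] at he ⊢
      exact Or.inr rfl
    · rw [getD_set_ne hip] at he ⊢
      exact Or.inl ⟨i, hi, he, rfl⟩
  · rintro (⟨i, hi, he, rfl⟩ | rfl)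
    · have hip : i ≠ p := by
        intro h0; subst h0; exact he hpe
      exact ⟨i, hi, by rwa [getD_set_ne hip], by rw [getD_set_ne hip]⟩
    · exact ⟨p, hp31, by rwa [getD_set_self hlen], by rw [getD_set_self hlen]⟩

-- span of A's array after one inserted element
theorem stepA (arr : List Int) (x : Int) (h1 : arr.length = 32) (h2 : ArrGood arr) :
    (saxInner 30 x arr).length = 32 ∧ ArrGood (saxInner 30 x arr) ∧
    (∀ v, SpanP (PA (saxInner 30 x arr)) v ↔ SpanP (fun b => PA arr b ∨ b = mN x) v) := by
  have hinn := innA_spec 30 le_rfl x arr (mN x) h2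
    (fun j hj => mN_high (by omega)) (by rw [Nat.xor_self]; exact .zero)
  rcases hinn with ⟨p, x', hp, hpe, hres, hbit, hbs, hsp⟩ | ⟨hres, hsp⟩
  · -- x' stored at empty slot p
    have hu0 : mN x' ≠ 0 := ne_zero_of_testBit hbit
    have hplen : p < arr.length := by omega
    rw [hres]
    refine ⟨by rw [List.length_set]; exact h1, ?_, ?_⟩
    · intro i hi he
      by_cases hip : i = p
      · subst hip
        rw [getD_set_self hplen] at he ⊢
        exact ⟨hbit, hbs⟩
      · rw [getD_set_ne hip] at he ⊢
        exact h2 i hi he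
    · intro v
      have e1 : ∀ w, PA (arr.set p x') w ↔ (PA arr w ∨ w = mN x') :=
        PA_set hplen (by omega) hpe hu0
      constructor
      · intro hv
        have s1 : SpanP (fun b => PA arr b ∨ b = mN x') v := span_congr e1 hv
        exact span_insert_mono hsp s1
      · intro hv
        have s1 : SpanP (fun b => PA arr b ∨ b = mN x') v :=
          span_insert_mono (by rwa [Nat.xor_comm]) hv
        exact span_congr (fun w => (e1 w).symm) s1
  · -- x discarded: mN x already in the span
    rw [hres]
    refine ⟨h1, h2, ?_⟩
    intro v
    exact (span_absorb hsp).symm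

def PIn (a : List Int) (b : Nat) : Prop := ∃ x ∈ a, b = mN x

theorem foldA : ∀ (a arr : List Int), arr.length = 32 → ArrGood arr →
    (a.foldl (fun basis x => saxInner 30 x basis) arr).length = 32 ∧
    ArrGood (a.foldl (fun basis x => saxInner 30 x basis) arr) ∧
    (∀ v, SpanP (PA (a.foldl (fun basis x => saxInner 30 x basis) arr)) v ↔
      SpanP (fun b => PA arr b ∨ PIn a b) v) := by
  intro a
  induction a with
  | nil =>
      intro arr hl hg
      refine ⟨hl, hg, fun v => ?_⟩
      constructor
      · intro h
        exact span_mono (fun b hb => Or.inl hb) h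
      · intro h
        refine span_bind (fun b hb => ?_) h
        rcases hb with hb | ⟨x, hx, _⟩
        · exact span_single hb
        · cases hx
      | cons x as ih =>
      intro arr hl hg
      rw [List.foldl_cons]
      obtain ⟨hs1, hs2, hs3⟩ := stepA arr x hl hg
      obtain ⟨hf1, hf2, hf3⟩ := ih (saxInner 30 x arr) hs1 hs2
      refine ⟨hf1, hf2, fun v => ?_⟩
      rw [hf3 v]
      constructor
      · intro h
        have h' : SpanP (fun b => (fun c => PA arr c ∨ c = mN x) b ∨ PIn as b) v :=
          span_union_congrQ (fun u => hs3 u) h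
        refine span_congr (fun b => ?_) h'
        constructor
        · rintro ((hb | hb) | hb)
          · exact Or.inl hb
          · exact Or.inr ⟨x, List.mem_cons_self, hb⟩
          · rcases hb with ⟨y, hy, hb⟩
            exact Or.inr ⟨y, List.mem_cons_of_mem _ hy, hb⟩
        · rintro (hb | ⟨y, hy, hb⟩)
          · exact Or.inl (Or.inl hb)
          · rcases List.mem_cons.1 hy with rfl | hy'
            · exact Or.inl (Or.inr hb)
            · exact Or.inr ⟨y, hy', hb⟩
      · intro h
        have h' : SpanP (fun b => (fun c => PA arr c ∨ c = mN x) b ∨ PIn as b) v := by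
          refine span_congr (fun b => ?_) h
          constructor
          · rintro (hb | ⟨y, hy, hb⟩)
            · exact Or.inl (Or.inl hb)
            · rcases List.mem_cons.1 hy with rfl | hy'
              · exact Or.inl (Or.inr hb)
              · exact Or.inr ⟨y, hy', hb⟩
          · rintro ((hb | hb) | hb)
            · exact Or.inl hb
            · exact Or.inr ⟨x, List.mem_cons_self, hb⟩
            · rcases hb with ⟨y, hy, hb⟩
              exact Or.inr ⟨y, List.mem_cons_of_mem _ hy, hb⟩
        exact span_union_congrQ (fun u => (hs3 u).symm) h'

theorem getD_replicate_zero (i : Nat) : (List.replicate 32 (0:Int)).getD i 0 = 0 := by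
  rw [List.getD_eq_getElem?_getD, List.getElem?_replicate]
  split <;> rfl

-- canonical pivot set of a span
def Canon (P : Nat → Prop) (q : Int) : Prop := ∃ w : Nat, SpanP P w ∧ w ≠ 0 ∧ (w.log2 : Int) = q

-- A's final array: slot i is occupied iff i is a canonical pivot bit of the input span
theorem A_char (a : List Int) :
    ∀ i : Nat, i < 31 →
      (((a.foldl (fun basis x => saxInner 30 x basis) (List.replicate 32 0)).getD i 0 ≠ 0) ↔
        Canon (PIn a) (i : Int)) := by
  intro i hi
  obtain ⟨hl, hg, hsp⟩ := foldA a (List.replicate 32 0) (by simp)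
    (fun j _ hj => absurd (getD_replicate_zero j) hj)
  set arr := a.foldl (fun basis x => saxInner 30 x basis) (List.replicate 32 0) with harr
  have hspan : ∀ v, SpanP (PA arr) v ↔ SpanP (PIn a) v := by
    intro v
    rw [hsp v]
    constructor
    · refine span_bind (fun b hb => ?_)
      rcases hb with hb | hb
      · obtain ⟨j, _, hj, _⟩ := hb
        exact absurd (getD_replicate_zero j) hj
      · exact span_single hb
    · exact span_mono (fun b hb => Or.inr hb)
  constructor
  · intro he
    refine ⟨mN (arr.getD i 0), (hspan _).1 (span_single ⟨i, hi, he, rfl⟩),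
      ne_zero_of_testBit (hg i hi he).1, ?_⟩
    rw [hb_eq (hg i hi he).1 (hg i hi he).2]
  · rintro ⟨w, hw, hwne, hwl⟩
    have hwA : SpanP (PA arr) w := (hspan w).2 hw
    obtain ⟨b, hbP, hbl⟩ := span_hb (goodPA hg) hwA hwne
    have hslot := PA_hb hg hbP
    have : b.log2 = i := by omega
    rw [this] at hslot
    exact hslot.2

theorem bitLength_pivot {b : Int} (hb : 0 < b) :
    (PySem.Int.bitLength b : Int) - 1 = (b.toNat.log2 : Int) := by
  have hne : b ≠ 0 := by omega
  have habs : b.natAbs = b.toNat := by omega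
  have h1 := PySem.Int.lt_two_pow_bitLength b
  have h2 := PySem.Int.two_pow_bitLength_le b hne
  rw [habs] at h1 h2
  have htn : b.toNat ≠ 0 := by omega
  have hL1 : 1 ≤ PySem.Int.bitLength b := by
    by_contra hc
    have : PySem.Int.bitLength b = 0 := by omega
    rw [this] at h1
    simp at h1
    omega
  have hlog : b.toNat.log2 = PySem.Int.bitLength b - 1 := by
    apply Nat.le_antisymm
    · have := (Nat.log2_lt htn).2 h1
      omega
    · exact (Nat.le_log2 htn).2 h2
  rw [hlog]
  omega

-- ===== B-side characterisation =====
def PV (vals : List Int) (b : Nat) : Prop := ∃ v ∈ vals, b = v.toNat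

theorem elim_spec : ∀ (fuel : Nat) (vals : List Int), vals.length ≤ fuel →
    (∀ v ∈ vals, 0 < v ∧ v < 2147483648) →
    ∀ q : Int, q ∈ altElimF fuel vals ↔ Canon (PV vals) q := by
  intro fuel
  induction fuel with
  | zero =>
      intro vals hlen hpos q
      have hv : vals = [] := by
        cases vals with
        | nil => rfl
        | cons a l => simp at hlen
      subst hv
      simp only [altElimF, List.not_mem_nil, false_iff]
      rintro ⟨w, hw, hwne, _⟩
      exact hwne (span_empty (by rintro b ⟨u, hu, _⟩; cases hu) hw)
  | succ fuel ih =>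
      intro vals hlen hpos q
      cases vals with
      | nil =>
          simp only [altElimF, List.not_mem_nil, false_iff]
          rintro ⟨w, hw, hwne, _⟩
          exact hwne (span_empty (by rintro b ⟨u, hu, _⟩; cases hu) hw)
      | cons v vs =>
          obtain ⟨M, hM⟩ : ∃ M, PySem.List.max? (v :: vs) (fun y => y) = some M := by
            cases hcase : PySem.List.max? (v :: vs) (fun y => y) with
            | none => exact absurd ((PySem.List.max?_eq_none_iff _ _).1 hcase) (by simp)
            | some M => exact ⟨M, rfl⟩
          have hMmem : M ∈ v :: vs := PySem.List.max?_mem hM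
          have hMmax : ∀ y ∈ v :: vs, y ≤ M := PySem.List.max?_isMax hM
          have hMpos := hpos M hMmem
          have hMne : M.toNat ≠ 0 := by omega
          set pn := M.toNat.log2 with hpn
          have hpI : (PySem.Int.bitLength M : Int) - 1 = (pn : Int) := bitLength_pivot hMpos.1
          have hpn30 : pn ≤ 30 := by
            have h31 : M.toNat < 2 ^ 31 := by omega
            have := (Nat.log2_lt hMne).2 h31
            omega
          set f : Int → Int := fun w =>
            if PySem.Int.band (w >>> pn) 1 ≠ 0 then PySem.Int.bxor w M else w with hf
          set vals' := (((v :: vs).map f).filter (fun w => w ≠ 0)) with hvals'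
          have hrw : altElimF (fuel+1) (v :: vs) = ((pn : Int)) :: altElimF fuel vals' := by
            simp only [altElimF, hM, Option.getD_some, hpI, hvals', hf, Int.toNat_natCast]
          -- arithmetic facts about f on members
          have hcond : ∀ w ∈ v :: vs,
              ((PySem.Int.band (w >>> pn) 1 ≠ 0) ↔ w.toNat.testBit pn = true) := by
            intro w hw
            have hp := hpos w hw
            rw [bit_cond w hpn30, mN_self (by omega) hp.2]
          have hfval : ∀ w ∈ v :: vs, f w =
              if w.toNat.testBit pn then ((w.toNat ^^^ M.toNat : Nat) : Int) else w := by
            intro w hw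
            have hp := hpos w hw
            simp only [hf]
            by_cases hb : w.toNat.testBit pn
            · rw [if_pos ((hcond w hw).2 hb), if_pos hb,
                PySem.Int.bxor_of_nonneg (by omega) (by omega)]
            · rw [if_neg (fun hc => hb ((hcond w hw).1 hc)), if_neg hb]
          have hfnn : ∀ w ∈ v :: vs, 0 ≤ f w := by
            intro w hw
            rw [hfval w hw]
            have hp := hpos w hw
            split
            · positivity
            · omega
          have hwlt2 : ∀ w ∈ v :: vs, w.toNat < 2 ^ (pn + 1) := by
            intro w hw
            have hle := hMmax w hw
            have hp := hpos w hw
            have h1 : w.toNat ≤ M.toNat := by omega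
            have h2 : M.toNat < 2 ^ (pn + 1) := lt_two_pow_hb_succ hMne
            omega
          have hfbits : ∀ w ∈ v :: vs, ∀ j, pn ≤ j → (f w).toNat.testBit j = false := by
            intro w hw j hj
            rw [hfval w hw]
            have hwlt := hwlt2 w hw
            have hMlt := lt_two_pow_hb_succ hMne
            rcases Nat.eq_or_lt_of_le hj with heq | hj'
            · subst heq
              by_cases hb : w.toNat.testBit pn
              · rw [if_pos hb, Int.toNat_natCast, Nat.testBit_xor, hb, hb_testBit hMne]
                rfl
              · rw [if_neg hb]
                rwa [Bool.not_eq_true] at hb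
            · have hhigh : ∀ n : Nat, n < 2 ^ (pn + 1) → n.testBit j = false := by
                intro n hn
                exact Nat.testBit_lt_two_pow
                  (lt_of_lt_of_le hn (Nat.pow_le_pow_right (by norm_num) (by omega)))
              by_cases hb : w.toNat.testBit pn
              · rw [if_pos hb, Int.toNat_natCast, Nat.testBit_xor, hhigh _ hwlt, hhigh _ hMlt]
                rfl
              · rw [if_neg hb]
                exact hhigh _ hwlt
          have hmem' : ∀ u, u ∈ vals' ↔ (∃ w ∈ v :: vs, u = f w) ∧ u ≠ 0 := by
            intro u
            rw [hvals', List.mem_filter, List.mem_map]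
            simp only [decide_eq_true_eq]
            constructor
            · rintro ⟨⟨w, hw, rfl⟩, hne⟩
              exact ⟨⟨w, hw, rfl⟩, hne⟩
            · rintro ⟨⟨w, hw, rfl⟩, hne⟩
              exact ⟨⟨w, hw, rfl⟩, hne⟩
          have hpos' : ∀ u ∈ vals', 0 < u ∧ u < 2147483648 := by
            intro u hu
            obtain ⟨⟨w, hw, rfl⟩, hne⟩ := (hmem' _).1 hu
            have h0 := hfnn w hw
            have hlt : (f w).toNat < 2 ^ pn :=
              lt_two_pow_of_bits (fun j hj => hfbits w hw j hj)
            have : (2 : Nat) ^ pn ≤ 2 ^ 30 := Nat.pow_le_pow_right (by norm_num) hpn30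
            constructor
            · omega
            · omega
          have hfM : f M = 0 := by
            rw [hfval M hMmem, if_pos (hb_testBit hMne), Nat.xor_self]
            rfl
          have hlen' : vals'.length ≤ fuel := by
            have h1 : vals'.length < ((v :: vs).map f).length := by
              rw [hvals']
              apply List.length_filter_lt_length_iff_exists.2
              refine ⟨0, List.mem_map.2 ⟨M, hMmem, hfM⟩, by simp⟩
            rw [List.length_map] at h1
            simp only [List.length_cons] at hlen h1
            omega
          -- span generators transfer
          have hS1 : ∀ b, PV (v :: vs) b → SpanP (fun c => PV vals' c ∨ c = M.toNat) b := by
            rintro b ⟨w, hw, rfl⟩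
            have hp := hpos w hw
            by_cases hb : w.toNat.testBit pn
            · have hfw : f w = ((w.toNat ^^^ M.toNat : Nat) : Int) := by
                rw [hfval w hw, if_pos hb]
              by_cases hz : f w = 0
              · have : w.toNat = M.toNat := by
                  rw [hfw] at hz
                  have : w.toNat ^^^ M.toNat = 0 := by exact_mod_cast hz
                  exact Nat.xor_eq_zero_iff.1 this
                rw [this]
                exact span_single (Or.inr rfl)
              · have hmem : f w ∈ vals' := (hmem' _).2 ⟨⟨w, hw, rfl⟩, hz⟩
                have hft : (f w).toNat = w.toNat ^^^ M.toNat := by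
                  rw [hfw, Int.toNat_natCast]
                have : w.toNat = (f w).toNat ^^^ M.toNat := by
                  rw [hft, Nat.xor_assoc, Nat.xor_self, Nat.xor_zero]
                rw [this]
                exact .step (span_single (Or.inl ⟨f w, hmem, rfl⟩)) (Or.inr rfl)
            · have hfw : f w = w := by rw [hfval w hw, if_neg hb]
              have hmem : w ∈ vals' := (hmem' _).2 ⟨⟨w, hw, (hfw).symm⟩, by omega⟩
              exact span_single (Or.inl ⟨w, hmem, rfl⟩)
          have hS2 : ∀ b, (PV vals' b ∨ b = M.toNat) → SpanP (PV (v :: vs)) b := by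
            rintro b (⟨u, hu, rfl⟩ | rfl)
            · obtain ⟨⟨w, hw, rfl⟩, hne⟩ := (hmem' _).1 hu
              have hp := hpos w hw
              by_cases hb : w.toNat.testBit pn
              · have hft : (f w).toNat = w.toNat ^^^ M.toNat := by
                  rw [hfval w hw, if_pos hb, Int.toNat_natCast]
                rw [hft]
                exact .step (span_single ⟨w, hw, rfl⟩) ⟨M, hMmem, rfl⟩
              · have hfw : f w = w := by rw [hfval w hw, if_neg hb]
                rw [hfw]
                exact span_single ⟨w, hw, rfl⟩
            · exact span_single ⟨M, hMmem, rfl⟩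
          have hbits' : ∀ b, PV vals' b → ∀ j, pn ≤ j → b.testBit j = false := by
            rintro b ⟨u, hu, rfl⟩ j hj
            obtain ⟨⟨w, hw, rfl⟩, _⟩ := (hmem' _).1 hu
            exact hfbits w hw j hj
          rw [hrw, List.mem_cons, ih vals' hlen' hpos' q]
          constructor
          · rintro (rfl | ⟨w, hw, hwne, hwl⟩)
            · refine ⟨M.toNat, span_single ⟨M, hMmem, rfl⟩, hMne, rfl⟩
            · exact ⟨w, span_bind hS2 (span_mono (fun b hb => Or.inl hb) hw), hwne, hwl⟩
          · rintro ⟨w, hw, hwne, hwl⟩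
            have hw' : SpanP (fun c => PV vals' c ∨ c = M.toNat) w := span_bind hS1 hw
            obtain ⟨u, hu, hcase⟩ := span_decompose hw'
            rcases hcase with heq | heq
            · subst heq
              exact Or.inr ⟨w, hu, hwne, hwl⟩
            · left
              rw [heq] at hwl
              have hult : u < 2 ^ M.toNat.log2 :=
                lt_two_pow_of_bits (fun j hj => span_bits (fun b hb => hbits' b hb j hj) hu)
              have hx := hb_xor_lt hMne hult
              have : (u ^^^ M.toNat).log2 = pn := by rw [Nat.xor_comm]; exact hx.1
              rw [this] at hwl
              omega

theorem mask_bounds (x : Int) : 0 ≤ PySem.Int.band x 2147483647 ∧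
    PySem.Int.band x 2147483647 < 2147483648 := by
  rw [band_mask_emod]
  have := Int.emod_nonneg x (show (2147483648:Int) ≠ 0 by norm_num)
  have := Int.emod_lt_of_pos x (show (0:Int) < 2147483648 by norm_num)
  omega

-- ===== VERDICT (by name: the statement is the Claim_ definition above) =====
theorem smallest_absent_xor_spec : Claim_equal_smallest_absent_xor := by
  unfold Claim_equal_smallest_absent_xor
  intro a _
  unfold Spec_smallest_absent_xor smallest_absent_xor smallest_absent_xor_alt
  simp only []
  set arr := a.foldl (fun basis x => saxInner 30 x basis) (List.replicate 32 0) with harr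
  set vals0 := (a.map (fun x => PySem.Int.band x 2147483647)).filter (fun v => v ≠ 0)
    with hvals0
  set pivots := altElimF vals0.length vals0 with hpiv
  have hmem0 : ∀ u, u ∈ vals0 ↔ (∃ x ∈ a, u = PySem.Int.band x 2147483647) ∧ u ≠ 0 := by
    intro u
    rw [hvals0, List.mem_filter, List.mem_map]
    simp only [decide_eq_true_eq]
    constructor
    · rintro ⟨⟨x, hx, rfl⟩, hne⟩
      exact ⟨⟨x, hx, rfl⟩, hne⟩
    · rintro ⟨⟨x, hx, rfl⟩, hne⟩
      exact ⟨⟨x, hx, rfl⟩, hne⟩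
  have hpos0 : ∀ v ∈ vals0, 0 < v ∧ v < 2147483648 := by
    intro u hu
    obtain ⟨⟨x, hx, rfl⟩, hne⟩ := (hmem0 _).1 hu
    have := mask_bounds x
    constructor <;> omega
  have hgen : ∀ b, b ≠ 0 → (PV vals0 b ↔ PIn a b) := by
    intro b hb
    constructor
    · rintro ⟨u, hu, rfl⟩
      obtain ⟨⟨x, hx, rfl⟩, _⟩ := (hmem0 _).1 hu
      exact ⟨x, hx, rfl⟩
    · rintro ⟨x, hx, rfl⟩
      have hmb := mask_bounds x
      have hne : PySem.Int.band x 2147483647 ≠ 0 := by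
        intro h0
        apply hb
        unfold mN
        rw [h0]
        rfl
      exact ⟨PySem.Int.band x 2147483647, (hmem0 _).2 ⟨⟨x, hx, rfl⟩, hne⟩, rfl⟩
  have hcanon : ∀ q : Int, Canon (PV vals0) q ↔ Canon (PIn a) q := by
    intro q
    constructor
    · rintro ⟨w, hw, hwne, hwl⟩
      exact ⟨w, span_gen_congr hgen hw, hwne, hwl⟩
    · rintro ⟨w, hw, hwne, hwl⟩
      exact ⟨w, span_gen_congr (fun b hb => (hgen b hb).symm) hw, hwne, hwl⟩
  have hpoint : ∀ i : Nat, i < 31 → ((arr.getD i 0 ≠ 0) ↔ (i : Int) ∈ pivots) := by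
    intro i hi
    rw [A_char a i hi, hpiv, elim_spec vals0.length vals0 le_rfl hpos0, hcanon]
  have hfind : ∀ idxs : List Int, (∀ i ∈ idxs, 0 ≤ i ∧ i < 31) →
      saxFind arr idxs = altFindB pivots idxs := by
    intro idxs
    induction idxs with
    | nil => intro _; rfl
    | cons i rest ih =>
        intro hall
        have hi := hall i List.mem_cons_self
        have hicast : ((i.toNat : Nat) : Int) = i := Int.toNat_of_nonneg hi.1
        have hi31 : i.toNat < 31 := by omega
        rw [saxFind, altFindB]
        by_cases hz : arr.getD i.toNat 0 = 0
        · rw [if_pos hz, if_neg (fun hc : i ∈ pivots => by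
            rw [← hicast] at hc
            exact ((hpoint i.toNat hi31).2 hc) hz)]
        · rw [if_neg hz, if_pos (by rw [← hicast]; exact (hpoint i.toNat hi31).1 hz)]
          exact ih (fun j hj => hall j (List.mem_cons_of_mem _ hj))
  exact hfind (PySem.List.pyRange 0 31 1) (by decide)
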